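-- pv_equiv track=rewrite | github.com/KensingtonOscupant/legalbench | leaderboard/scorer/row_level_metrics.py | evaluate_successor_liability_f1_single_example
-- ===== SOURCE A (Python) =====
-- def evaluate_successor_liability_f1_single_example(output: str, answer: str):
--     """
--     [Evaluates single example, implementation borrowed from evaluation.py]
--     For successor liability, we measure F1 over the predicted exceptions.
--     """
--     CLASSES = [
--         "express agreement",
--         "fraudulent conveyance",
--         "de facto merger",
--         "mere continuation",
--     ]
--     tp, fp, fn = 0, 0, 0
--     predictions = [c for c in CLASSES if c in str(output)]
--     sample_answers = str(answer).split(",")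
--
--     for j in range(len(predictions)):
--         if predictions[j] in sample_answers:
--             index = sample_answers.index(predictions[j])
--             del sample_answers[index]
--             tp += 1
--         else:
--             fp += 1
--     fn += len(sample_answers)
--     return tp, fp, fn # return raw results for calculating micro-f1 both per row and later for entire task
-- ===== SOURCE B (Python) =====
-- def evaluate_successor_liability_f1_single_example(output: str, answer: str):
--     CLASSES = [
--         "express agreement",
--         "fraudulent conveyance",
--         "de facto merger",
--         "mere continuation",
--     ]
--     predictions = [c for c in CLASSES if c in str(output)]
--     sample_answers = str(answer).split(",")
--     answer_set = set(sample_answers)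
--     tp = sum(1 for p in predictions if p in answer_set)
--     # CLASSES are distinct, so each matched prediction would remove exactly
--     # one answer in A's loop; fp/fn follow by arithmetic.
--     return tp, len(predictions) - tp, len(sample_answers) - tp
-- ===== Notes on version B (the rewrite author's own statement) =====
-- stated objective: simpler
-- what changed: Replaces A's stateful loop that mutates the answer list via index/del and branches to increment tp or fp with a single tp count over predictions against a set of the split answers, deriving fp and fn by arithmetic (fp = len(predictions)-tp, fn = len(sample_answers)-tp); valid because CLASSES are distinct.
import Mathlib
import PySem

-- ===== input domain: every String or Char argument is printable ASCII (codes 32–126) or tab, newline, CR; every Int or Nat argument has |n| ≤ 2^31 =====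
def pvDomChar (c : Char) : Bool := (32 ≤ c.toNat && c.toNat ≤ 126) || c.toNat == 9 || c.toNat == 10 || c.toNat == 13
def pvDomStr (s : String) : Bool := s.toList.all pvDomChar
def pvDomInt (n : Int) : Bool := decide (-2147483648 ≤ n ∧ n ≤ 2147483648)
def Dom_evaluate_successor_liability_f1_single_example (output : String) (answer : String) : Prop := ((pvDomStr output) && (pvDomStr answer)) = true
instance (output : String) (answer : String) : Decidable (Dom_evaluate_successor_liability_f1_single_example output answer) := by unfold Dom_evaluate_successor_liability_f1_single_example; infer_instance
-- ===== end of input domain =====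

-- B replaces A's mutating index/del loop and tp/fp branching by one tp count
-- over a set of the split answers plus arithmetic (objective: simpler).

-- ===== PORT A =====
def pvClassesA : List String :=
  ["express agreement", "fraudulent conveyance", "de facto merger", "mere continuation"]

-- the for-loop over predictions, carrying the mutable sample_answers, tp, fp
def pvLoopA : List String → List String → Int → Int → Int × Int × Int
  | [], ans, tp, fp => (tp, fp, (ans.length : Int))   -- fn = 0 + len(sample_answers)
  | p :: rest, ans, tp, fp =>
    if p ∈ ans then
      -- index = sample_answers.index(p); del sample_answers[index]
      -- (index? is some here since p ∈ ans; the guard makes getD's default unreachable)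
      pvLoopA rest (ans.eraseIdx ((PySem.List.index? ans p).getD 0)) (tp + 1) fp
    else
      pvLoopA rest ans tp (fp + 1)

def evaluate_successor_liability_f1_single_example (output : String) (answer : String) : Int × Int × Int :=
  let predictions := pvClassesA.filter (fun c => PySem.Str.isIn c output)
  let sample_answers := (PySem.Str.split? answer ",").getD []  -- sep "," ≠ "" so split? is some; getD unreachable
  pvLoopA predictions sample_answers 0 0

-- ===== PORT B =====
def pvClassesB : List String :=
  ["express agreement", "fraudulent conveyance", "de facto merger", "mere continuation"]

def evaluate_successor_liability_f1_single_example_alt (output : String) (answer : String) : Int × Int × Int :=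
  let predictions := pvClassesB.filter (fun c => PySem.Str.isIn c output)
  let sample_answers := (PySem.Str.split? answer ",").getD []  -- sep "," ≠ "" so split? is some; getD unreachable
  let answer_set := PySem.Set.ofList sample_answers
  let tp : Int := ((predictions.filter (fun p => PySem.Set.contains answer_set p)).length : Int)
  (tp, (predictions.length : Int) - tp, (sample_answers.length : Int) - tp)

-- ===== PRECONDITION & SPEC =====
def Spec_evaluate_successor_liability_f1_single_example (output : String) (answer : String) (out : Int × Int × Int) : Prop := out = evaluate_successor_liability_f1_single_example_alt output answer
instance (output : String) (answer : String) (out : Int × Int × Int) : Decidable (Spec_evaluate_successor_liability_f1_single_example output answer out) := by unfold Spec_evaluate_successor_liability_f1_single_example; infer_instance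

-- ===== CLAIM (what is proved, stated in full; the proofs are below) =====
def Claim_equal_evaluate_successor_liability_f1_single_example : Prop := ∀ (output : String) (answer : String), Dom_evaluate_successor_liability_f1_single_example output answer → Spec_evaluate_successor_liability_f1_single_example output answer (evaluate_successor_liability_f1_single_example output answer)

-- ===== LEMMAS AND PROOFS =====

-- deleting at the first index of p (A's index/del pair) is List.erase
lemma pv_eraseIdx_index (ans : List String) (p : String) (h : p ∈ ans) :
    ans.eraseIdx ((PySem.List.index? ans p).getD 0) = ans.erase p := by
  rw [PySem.List.index?_eq_idxOf?, List.erase_eq_eraseIdx]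
  have : (List.idxOf? p ans).isSome := by
    simpa [List.isSome_idxOf?] using h
  obtain ⟨i, hi⟩ := Option.isSome_iff_exists.mp this
  simp [hi]

-- the loop invariant: with distinct predictions, the loop's result is
-- (tp + T, fp + (len preds - T), len ans - T) where T counts predictions in ans
lemma pvLoopA_eq (preds : List String) : ∀ (ans : List String) (tp fp : Int),
    preds.Nodup →
    pvLoopA preds ans tp fp =
      (tp + ((preds.filter (fun p => decide (p ∈ ans))).length : Int),
       fp + (preds.length : Int) - ((preds.filter (fun p => decide (p ∈ ans))).length : Int),
       (ans.length : Int) - ((preds.filter (fun p => decide (p ∈ ans))).length : Int)) := by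
  induction preds with
  | nil => intro ans tp fp _; simp [pvLoopA]
  | cons p rest ih =>
    intro ans tp fp hnd
    obtain ⟨hp, hrest⟩ := List.nodup_cons.mp hnd
    by_cases hmem : p ∈ ans
    · have hcongr : rest.filter (fun q => decide (q ∈ ans.erase p))
          = rest.filter (fun q => decide (q ∈ ans)) := by
        apply List.filter_congr
        intro q hq
        have hne : q ≠ p := fun e => hp (e ▸ hq)
        simp [List.mem_erase_of_ne hne]
      have hlen : (ans.erase p).length = ans.length - 1 := List.length_erase_of_mem hmem
      have hlen' : 1 ≤ ans.length := List.length_pos_of_mem hmem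
      simp only [pvLoopA, if_pos hmem, pv_eraseIdx_index ans p hmem,
        ih (ans.erase p) (tp + 1) fp hrest, hcongr,
        List.filter_cons, decide_eq_true hmem, List.length_cons, hlen]
      refine Prod.ext ?_ (Prod.ext ?_ ?_) <;> simp <;> omega
    · simp only [pvLoopA, if_neg hmem, ih ans tp (fp + 1) hrest,
        List.filter_cons, List.length_cons]
      have : (decide (p ∈ ans)) = false := by simpa using hmem
      simp only [this, Bool.false_eq_true, if_false]
      refine Prod.ext ?_ (Prod.ext ?_ ?_) <;> simp <;> omega

-- ===== VERDICT (by name: the statement is the Claim_ definition above) =====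
theorem evaluate_successor_liability_f1_single_example_spec : Claim_equal_evaluate_successor_liability_f1_single_example := by
  intro output answer _
  unfold Spec_evaluate_successor_liability_f1_single_example
  unfold evaluate_successor_liability_f1_single_example
  unfold evaluate_successor_liability_f1_single_example_alt
  have hBA : pvClassesB = pvClassesA := rfl
  simp only [hBA]
  set predictions := pvClassesA.filter (fun c => PySem.Str.isIn c output) with hpred
  set sample_answers := (PySem.Str.split? answer ",").getD []  -- sep "," ≠ "" so split? is some; getD unreachable with hans
  have hnd : predictions.Nodup := by
    apply List.Nodup.filter
    unfold pvClassesA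
    decide
  rw [pvLoopA_eq predictions sample_answers 0 0 hnd]
  have hset : (fun p => PySem.Set.contains (PySem.Set.ofList sample_answers) p)
      = (fun p => decide (p ∈ sample_answers)) := by
    funext p
    simp [PySem.Set.mem_ofList]
  simp only [hset]
  refine Prod.ext ?_ (Prod.ext ?_ ?_) <;> simp [sub_eq_add_neg]
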